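-- pv_equiv track=rewrite | github.com/HemJVK/Culinary-Canvas | Culinary Canvas/menu_utils.py | validate_dietary_restrictions
-- ===== SOURCE A (Python) =====
-- from typing import List, Tuple, Dict
--
-- def validate_dietary_restrictions(name: str, description: str, restrictions: List[str]) -> List[str]:
--     """Validate and correct dietary restrictions based on item description."""
--     validated = restrictions.copy()
--
--     # Common validation rules
--     if 'Vegan' in validated:
--         if any(ingredient in description.lower() for ingredient in
--               ['cheese', 'honey', 'milk', 'cream', 'yogurt']):
--             validated.remove('Vegan')
--             if 'Vegetarian' not in validated:
--                 validated.append('Vegetarian')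
--
--     if 'Gluten-Free' in validated:
--         if any(ingredient in description.lower() for ingredient in
--               ['pita', 'bread', 'filo', 'phyllo', 'pasta']):
--             validated.remove('Gluten-Free')
--
--     if 'Nut-Free' in validated:
--         if any(ingredient in description.lower() for ingredient in
--               ['almond', 'walnut', 'pecan', 'pine nut', 'pistachio']):
--             validated.remove('Nut-Free')
--
--     return validated
-- ===== SOURCE B (Python) =====
-- def validate_dietary_restrictions(name, description, restrictions):
--     """Validate and correct dietary restrictions based on item description."""
--     desc = description.lower()
--     rules = [
--         ('Vegan', ['cheese', 'honey', 'milk', 'cream', 'yogurt']),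
--         ('Gluten-Free', ['pita', 'bread', 'filo', 'phyllo', 'pasta']),
--         ('Nut-Free', ['almond', 'walnut', 'pecan', 'pine nut', 'pistachio']),
--     ]
--     pending = [tag for tag, keywords in rules if any(kw in desc for kw in keywords)]
--     vegan_flagged = 'Vegan' in pending
--     out = []
--     for tag in restrictions:
--         if tag in pending:
--             pending.remove(tag)
--         else:
--             out.append(tag)
--     if vegan_flagged and 'Vegan' not in pending and 'Vegetarian' not in restrictions:
--         out.append('Vegetarian')
--     return out
-- ===== Notes on version B (the rewrite author's own statement) =====
-- stated objective: alternative
-- what changed: Replaces A's three hand-written branches (each with its own membership test and list.remove on the copy) by a declarative (tag, keywords) rules table from which the set of tags to drop is computed once, followed by a single filtering pass over the restrictions that skips the first occurrence of each dropped tag; the Vegan->Vegetarian substitution is decided from the pass's final pending state.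
import Mathlib
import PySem

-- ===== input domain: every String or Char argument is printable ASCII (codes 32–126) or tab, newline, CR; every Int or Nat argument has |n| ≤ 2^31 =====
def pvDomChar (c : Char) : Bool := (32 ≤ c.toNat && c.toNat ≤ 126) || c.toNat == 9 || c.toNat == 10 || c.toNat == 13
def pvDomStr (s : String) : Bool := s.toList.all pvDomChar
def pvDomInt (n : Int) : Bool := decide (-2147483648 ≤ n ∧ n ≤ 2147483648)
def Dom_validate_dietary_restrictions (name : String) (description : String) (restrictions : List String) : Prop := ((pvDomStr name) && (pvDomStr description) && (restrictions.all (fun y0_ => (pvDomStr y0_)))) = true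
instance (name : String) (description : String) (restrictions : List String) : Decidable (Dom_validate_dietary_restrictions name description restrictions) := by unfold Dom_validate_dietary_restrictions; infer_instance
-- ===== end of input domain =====

-- B replaces A's three hand-written branches by a rules table and ONE filtering pass
-- over the restrictions list (objective: alternative decomposition; same cost).

-- ===== PORT A =====
-- Literal transliteration of A: copy, then three guarded `remove` branches.
-- `.remove(t)` is guarded by `t in validated`, so it is exactly `List.erase`.
def validate_dietary_restrictions (name : String) (description : String) (restrictions : List String) : List String :=
  let validated := restrictions
  let validated :=
    if "Vegan" ∈ validated then
      if ["cheese", "honey", "milk", "cream", "yogurt"].any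
           (fun ingredient => PySem.Str.isIn ingredient (PySem.Str.lower description)) then
        let validated := validated.erase "Vegan"
        if "Vegetarian" ∈ validated then validated else validated ++ ["Vegetarian"]
      else validated
    else validated
  let validated :=
    if "Gluten-Free" ∈ validated then
      if ["pita", "bread", "filo", "phyllo", "pasta"].any
           (fun ingredient => PySem.Str.isIn ingredient (PySem.Str.lower description)) then
        validated.erase "Gluten-Free"
      else validated
    else validated
  let validated :=
    if "Nut-Free" ∈ validated then
      if ["almond", "walnut", "pecan", "pine nut", "pistachio"].any
           (fun ingredient => PySem.Str.isIn ingredient (PySem.Str.lower description)) then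
        validated.erase "Nut-Free"
      else validated
    else validated
  validated

-- ===== PORT B =====
def bRules : List (String × List String) :=
  [("Vegan", ["cheese", "honey", "milk", "cream", "yogurt"]),
   ("Gluten-Free", ["pita", "bread", "filo", "phyllo", "pasta"]),
   ("Nut-Free", ["almond", "walnut", "pecan", "pine nut", "pistachio"])]

-- the `for tag in restrictions` loop: returns (out, final pending)
def bPass : List String → List String → List String × List String
  | [], pending => ([], pending)
  | tag :: rest, pending =>
      if tag ∈ pending then bPass rest (pending.erase tag)
      else
        let r := bPass rest pending
        (tag :: r.1, r.2)

def validate_dietary_restrictions_alt (name : String) (description : String) (restrictions : List String) : List String :=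
  let desc := PySem.Str.lower description
  let pending := (bRules.filter (fun rule => rule.2.any (fun kw => PySem.Str.isIn kw desc))).map
      (fun rule => rule.1)
  let veganFlagged := "Vegan" ∈ pending
  let r := bPass restrictions pending
  if veganFlagged ∧ "Vegan" ∉ r.2 ∧ "Vegetarian" ∉ restrictions then r.1 ++ ["Vegetarian"]
  else r.1

-- ===== PRECONDITION & SPEC =====
def Spec_validate_dietary_restrictions (name : String) (description : String) (restrictions : List String) (out : List String) : Prop := out = validate_dietary_restrictions_alt name description restrictions
instance (name : String) (description : String) (restrictions : List String) (out : List String) : Decidable (Spec_validate_dietary_restrictions name description restrictions out) := by unfold Spec_validate_dietary_restrictions; infer_instance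

-- ===== CLAIM (what is proved, stated in full; the proofs are below) =====
def Claim_equal_validate_dietary_restrictions : Prop := ∀ (name : String) (description : String) (restrictions : List String), Dom_validate_dietary_restrictions name description restrictions → Spec_validate_dietary_restrictions name description restrictions (validate_dietary_restrictions name description restrictions)

-- ===== LEMMAS AND PROOFS =====

-- the pass with an empty pending list copies its input
theorem bPass_nil_pending (xs : List String) : bPass xs [] = (xs, []) := by
  induction xs with
  | nil => rfl
  | cons x t ih => simp [bPass, ih]

-- peeling one pending tag off the pass = erasing its first occurrence up front
theorem bPass_cons_pending (xs : List String) : ∀ (P : List String) (p : String), p ∉ P →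
    (bPass xs (p :: P)).1 = (bPass (xs.erase p) P).1 := by
  induction xs with
  | nil => intro P p _; simp [bPass]
  | cons x t ih =>
    intro P p hp
    by_cases hx : x = p
    · subst hx
      simp [bPass, List.erase_cons_head]
    · have hbeq : (p == x) = false := by simp [Ne.symm hx]
      by_cases hxP : x ∈ P
      · have h1 : x ∈ p :: P := List.mem_cons_of_mem _ hxP
        have h2 : (p :: P).erase x = p :: P.erase x := by
          rw [List.erase_cons_tail]; simp [hbeq]
        have hp' : p ∉ P.erase x := fun h => hp (List.mem_of_mem_erase h)
        simp only [bPass, if_pos h1, h2]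
        rw [ih _ _ hp']
        rw [List.erase_cons_tail (by simp [hx])]
        simp [bPass, hxP]
      · have h1 : x ∉ p :: P := by simp [hx, hxP]
        simp only [bPass, if_neg h1]
        rw [List.erase_cons_tail (by simp [hx])]
        simp [bPass, hxP, ih _ _ hp]

-- a tag survives in the final pending list iff it was pending and never seen
theorem bPass_pending_mem (xs : List String) : ∀ (P : List String), P.Nodup → ∀ (a : String),
    (a ∈ (bPass xs P).2 ↔ a ∈ P ∧ a ∉ xs) := by
  induction xs with
  | nil => intro P _ a; simp [bPass]
  | cons x t ih =>
    intro P hnd a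
    by_cases hx : x ∈ P
    · simp only [bPass, if_pos hx]
      rw [ih _ (List.Nodup.erase _ hnd) a]
      by_cases hax : a = x
      · subst hax
        simp [List.Nodup.not_mem_erase hnd, hx]
      · simp [List.mem_erase_of_ne hax, hax]
    · simp only [bPass, if_neg hx]
      rw [ih _ hnd a]
      constructor
      · rintro ⟨h1, h2⟩
        exact ⟨h1, by simp [h2]; rintro rfl; exact hx h1⟩
      · rintro ⟨h1, h2⟩
        exact ⟨h1, fun h => h2 (List.mem_cons_of_mem _ h)⟩

-- the guarded remove is just erase (erase is a no-op on a missing element)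
theorem guarded_erase (t : String) (l : List String) :
    (if t ∈ l then l.erase t else l) = l.erase t := by
  split
  · rfl
  · exact (List.erase_of_not_mem (by assumption)).symm

-- erasing a tag ≠ b commutes with an appended [b]
theorem erase_append_singleton (a b : String) (h : a ≠ b) (l : List String) :
    (l ++ [b]).erase a = l.erase a ++ [b] := by
  rw [List.erase_append]
  by_cases hm : a ∈ l
  · simp [hm]
  · simp [hm, List.erase_of_not_mem, h]

-- specializations used by the final simp (string disequalities discharged by decide)
theorem eraseG_append (l : List String) : (l ++ ["Vegetarian"]).erase "Gluten-Free" = l.erase "Gluten-Free" ++ ["Vegetarian"] :=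
  erase_append_singleton _ _ (by decide) l

theorem eraseN_append (l : List String) : (l ++ ["Vegetarian"]).erase "Nut-Free" = l.erase "Nut-Free" ++ ["Vegetarian"] :=
  erase_append_singleton _ _ (by decide) l

-- ===== VERDICT (by name: the statement is the Claim_ definition above) =====
theorem validate_dietary_restrictions_spec : Claim_equal_validate_dietary_restrictions := by
  intro name description restrictions _
  unfold Spec_validate_dietary_restrictions
  unfold validate_dietary_restrictions validate_dietary_restrictions_alt bRules
  set desc := PySem.Str.lower description with hdesc
  by_cases c1 : (["cheese", "honey", "milk", "cream", "yogurt"].any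
      (fun kw => PySem.Str.isIn kw desc)) = true <;>
  by_cases c2 : (["pita", "bread", "filo", "phyllo", "pasta"].any
      (fun kw => PySem.Str.isIn kw desc)) = true <;>
  by_cases c3 : (["almond", "walnut", "pecan", "pine nut", "pistachio"].any
      (fun kw => PySem.Str.isIn kw desc)) = true <;>
  simp only [List.filter, List.map, c1, c2, c3, if_true, if_false, guarded_erase] <;>
  (repeat rw [bPass_cons_pending _ _ _ (by decide)]) <;>
  rw [bPass_nil_pending] <;>
  by_cases hV : "Vegan" ∈ restrictions <;>
  by_cases hVeg : "Vegetarian" ∈ restrictions <;>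
  simp [hV, hVeg, bPass_pending_mem, eraseG_append, eraseN_append, List.erase_of_not_mem]
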